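-- pv_equiv track=rewrite | github.com/sv158/mulan2020 | ulan2020/compile/asm.py | encode_lnotab
-- ===== SOURCE A (Python) =====
-- def iter_line_incr(line_incr):
--     if line_incr > 0:
--         while line_incr > 127:
--             line_incr -= 127
--             yield 127
--         yield line_incr
--     else:
--         while line_incr < -128:
--             line_incr += 128
--             yield 128
--         yield 256 + line_incr
--
-- def encode_lnotab(lnotab, firstlineno):
--     lastoffset = 0
--     lastlineno = firstlineno
--
--     for offset, lineno in lnotab:
--         line_incr = lineno - lastlineno
--         if line_incr == 0:
--             continue
--         byte_incr = offset - lastoffset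
--
--         while byte_incr > 255:
--             byte_incr -= 255
--             yield 255
--             yield 0
--
--         it = iter_line_incr(line_incr)
--         yield byte_incr
--         yield next(it)
--         for i in it:
--             yield 0
--             yield i
--
--         lastoffset = offset
--         lastlineno = lineno
-- ===== SOURCE B (Python) =====
-- # B: replaces A's repeated-subtraction while-loops and the iter_line_incr sub-generator
-- # with closed-form division that builds chunk lists, then weaves them into the stream.
-- def encode_lnotab(lnotab, firstlineno):
--     lastoffset = 0
--     lastlineno = firstlineno
--     for offset, lineno in lnotab:
--         line_incr = lineno - lastlineno
--         if line_incr == 0: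
--             continue
--         byte_incr = offset - lastoffset
--         if byte_incr >= 1:
--             k = (byte_incr - 1) // 255
--             byte_chunks = [255] * k + [byte_incr - 255 * k]
--         else:
--             byte_chunks = [byte_incr]
--         if line_incr > 0:
--             m = (line_incr - 1) // 127
--             line_chunks = [127] * m + [line_incr - 127 * m]
--         else:
--             m = (-line_incr - 1) // 128
--             line_chunks = [128] * m + [256 + line_incr + 128 * m]
--         for b in byte_chunks[:-1]:
--             yield b
--             yield 0
--         yield byte_chunks[-1]
--         yield line_chunks[0]
--         for l in line_chunks[1:]:
--             yield 0
--             yield l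
--         lastoffset = offset
--         lastlineno = lineno
-- ===== Notes on version B (the rewrite author's own statement) =====
-- stated objective: alternative
-- what changed: A streams each entry via repeated-subtraction while-loops and a separate iter_line_incr sub-generator; B computes the number of 255/127/128 filler chunks in closed form with integer division, builds the byte-chunk and line-chunk lists, and weaves them into the output stream.
import Mathlib
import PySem

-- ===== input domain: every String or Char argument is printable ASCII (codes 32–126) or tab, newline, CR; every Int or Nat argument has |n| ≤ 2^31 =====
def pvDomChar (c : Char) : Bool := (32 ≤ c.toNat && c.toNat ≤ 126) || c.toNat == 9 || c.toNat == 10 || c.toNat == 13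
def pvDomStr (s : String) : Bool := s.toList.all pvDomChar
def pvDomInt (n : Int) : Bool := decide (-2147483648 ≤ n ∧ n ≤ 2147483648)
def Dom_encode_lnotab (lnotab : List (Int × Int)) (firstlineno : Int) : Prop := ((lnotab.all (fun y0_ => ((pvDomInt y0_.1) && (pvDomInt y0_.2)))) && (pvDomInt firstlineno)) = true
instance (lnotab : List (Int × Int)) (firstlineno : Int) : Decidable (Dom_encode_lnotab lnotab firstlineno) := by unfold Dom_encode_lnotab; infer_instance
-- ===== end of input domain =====

-- B replaces A's repeated-subtraction while-loops and the iter_line_incr sub-generator by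
-- closed-form division building chunk lists that are then woven into the stream (objective: alternative).

-- ===== PORT A =====
-- 'while byte_incr > 255: byte_incr -= 255; yield 255; yield 0' — returns (yielded bytes, final byte_incr)
def pyWhile255 (byte_incr : Int) : List Int × Int :=
  if h : byte_incr > 255 then
    let r := pyWhile255 (byte_incr - 255)
    ((255 : Int) :: (0 : Int) :: r.1, r.2)
  else ([], byte_incr)
termination_by byte_incr.toNat
decreasing_by omega

-- iter_line_incr, positive branch ('while line_incr > 127: …; yield 127' then 'yield line_incr')
def iterLineIncrPos (line_incr : Int) : List Int :=
  if h : line_incr > 127 then (127 : Int) :: iterLineIncrPos (line_incr - 127)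
  else [line_incr]
termination_by line_incr.toNat
decreasing_by omega

-- iter_line_incr, non-positive branch ('while line_incr < -128: …; yield 128' then 'yield 256 + line_incr')
def iterLineIncrNeg (line_incr : Int) : List Int :=
  if h : line_incr < -128 then (128 : Int) :: iterLineIncrNeg (line_incr + 128)
  else [256 + line_incr]
termination_by (-line_incr).toNat
decreasing_by omega

def iter_line_incr (line_incr : Int) : List Int :=
  if line_incr > 0 then iterLineIncrPos line_incr else iterLineIncrNeg line_incr

def encode_lnotab_go (lnotab : List (Int × Int)) (lastoffset lastlineno : Int) : List Int :=
  match lnotab with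
  | [] => []
  | (offset, lineno) :: rest =>
    let line_incr := lineno - lastlineno
    if line_incr == 0 then encode_lnotab_go rest lastoffset lastlineno
    else
      let byte_incr := offset - lastoffset
      let w := pyWhile255 byte_incr
      let it := iter_line_incr line_incr
      -- yield byte_incr; yield next(it); for i in it: yield 0; yield i
      w.1 ++ (w.2 :: it.head! :: it.tail.flatMap (fun i => [(0 : Int), i]))
        ++ encode_lnotab_go rest offset lineno

def encode_lnotab (lnotab : List (Int × Int)) (firstlineno : Int) : List Int :=
  encode_lnotab_go lnotab 0 firstlineno

-- ===== PORT B =====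
def byteChunks (byte_incr : Int) : List Int :=
  if byte_incr ≥ 1 then
    List.replicate (PySem.Int.floordiv (byte_incr - 1) 255).toNat 255
      ++ [byte_incr - 255 * PySem.Int.floordiv (byte_incr - 1) 255]
  else [byte_incr]

def lineChunks (line_incr : Int) : List Int :=
  if line_incr > 0 then
    List.replicate (PySem.Int.floordiv (line_incr - 1) 127).toNat 127
      ++ [line_incr - 127 * PySem.Int.floordiv (line_incr - 1) 127]
  else
    List.replicate (PySem.Int.floordiv (-line_incr - 1) 128).toNat 128
      ++ [256 + line_incr + 128 * PySem.Int.floordiv (-line_incr - 1) 128]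


def encode_lnotab_alt_go (lnotab : List (Int × Int)) (lastoffset lastlineno : Int) : List Int :=
  match lnotab with
  | [] => []
  | (offset, lineno) :: rest =>
    let line_incr := lineno - lastlineno
    if line_incr == 0 then encode_lnotab_alt_go rest lastoffset lastlineno
    else
      let bc := byteChunks (offset - lastoffset)
      let lc := lineChunks line_incr
      bc.dropLast.flatMap (fun b => [b, (0 : Int)])
        ++ [bc.getLast!] ++ [lc.head!] ++ lc.tail.flatMap (fun l => [(0 : Int), l])
        ++ encode_lnotab_alt_go rest offset lineno

def encode_lnotab_alt (lnotab : List (Int × Int)) (firstlineno : Int) : List Int :=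
  encode_lnotab_alt_go lnotab 0 firstlineno

-- ===== PRECONDITION & SPEC =====
def Spec_encode_lnotab (lnotab : List (Int × Int)) (firstlineno : Int) (out : List Int) : Prop := out = encode_lnotab_alt lnotab firstlineno
instance (lnotab : List (Int × Int)) (firstlineno : Int) (out : List Int) : Decidable (Spec_encode_lnotab lnotab firstlineno out) := by unfold Spec_encode_lnotab; infer_instance

-- ===== CLAIM (what is proved, stated in full; the proofs are below) =====
def Claim_equal_encode_lnotab : Prop := ∀ (lnotab : List (Int × Int)) (firstlineno : Int), Dom_encode_lnotab lnotab firstlineno → Spec_encode_lnotab lnotab firstlineno (encode_lnotab lnotab firstlineno)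

-- ===== LEMMAS AND PROOFS =====

theorem byteChunks_step (b : Int) (h : b > 255) : byteChunks b = 255 :: byteChunks (b - 255) := by
  unfold byteChunks
  rw [if_pos (by omega : b ≥ 1), if_pos (by omega : b - 255 ≥ 1)]
  rw [PySem.Int.floordiv_eq_ediv_of_pos (by norm_num), PySem.Int.floordiv_eq_ediv_of_pos (by norm_num)]
  have hk : (b - 1) / 255 = (b - 255 - 1) / 255 + 1 := by omega
  have hk' : 0 ≤ (b - 255 - 1) / 255 := by omega
  rw [hk]
  have : ((b - 255 - 1) / 255 + 1).toNat = ((b - 255 - 1) / 255).toNat + 1 := by omega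
  rw [this, List.replicate_succ]
  have he : b - 255 * ((b - 255 - 1) / 255 + 1) = b - 255 - 255 * ((b - 255 - 1) / 255) := by ring
  rw [he]
  simp

theorem byteChunks_base (b : Int) (h : ¬ b > 255) : byteChunks b = [b] := by
  unfold byteChunks
  by_cases h1 : b ≥ 1
  · rw [if_pos h1, PySem.Int.floordiv_eq_ediv_of_pos (by norm_num)]
    have : (b - 1) / 255 = 0 := by omega
    rw [this]; simp
  · rw [if_neg h1]

theorem byteChunks_ne_nil (b : Int) : byteChunks b ≠ [] := by
  unfold byteChunks; split <;> simp

theorem getLast!_cons_of_ne_nil' (a : Int) (l : List Int) (h : l ≠ []) : (a :: l).getLast! = l.getLast! := by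
  cases l with
  | nil => cases h rfl
  | cons b t => rfl

theorem byteChunks_weave (b : Int) :
    (byteChunks b).dropLast.flatMap (fun c => [c, (0 : Int)]) = (pyWhile255 b).1 ∧
    (byteChunks b).getLast! = (pyWhile255 b).2 := by
  induction b using pyWhile255.induct with
  | case1 b h ih =>
      rw [byteChunks_step b h]
      unfold pyWhile255
      rw [dif_pos h]
      have hne := byteChunks_ne_nil (b - 255)
      constructor
      · rw [List.dropLast_cons_of_ne_nil hne]
        simp [ih.1]
      · rw [getLast!_cons_of_ne_nil' 255 _ hne]
        exact ih.2
  | case2 b h =>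
      rw [byteChunks_base b h]
      unfold pyWhile255
      rw [dif_neg h]
      simp

theorem lineChunksPos (l : Int) (h : 0 < l) : lineChunks l = iterLineIncrPos l := by
  induction l using iterLineIncrPos.induct with
  | case1 l h1 ih =>
      unfold iterLineIncrPos
      rw [dif_pos h1, ← ih (by omega)]
      unfold lineChunks
      rw [if_pos h, if_pos (by omega : (0:Int) < l - 127)]
      rw [PySem.Int.floordiv_eq_ediv_of_pos (by norm_num), PySem.Int.floordiv_eq_ediv_of_pos (by norm_num)]
      have hk : (l - 1) / 127 = (l - 127 - 1) / 127 + 1 := by omega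
      have hk' : 0 ≤ (l - 127 - 1) / 127 := by omega
      rw [hk]
      have : ((l - 127 - 1) / 127 + 1).toNat = ((l - 127 - 1) / 127).toNat + 1 := by omega
      rw [this, List.replicate_succ]
      have he : l - 127 * ((l - 127 - 1) / 127 + 1) = l - 127 - 127 * ((l - 127 - 1) / 127) := by ring
      rw [he]
      simp
  | case2 l h1 =>
      unfold iterLineIncrPos
      rw [dif_neg h1]
      unfold lineChunks
      rw [if_pos h, PySem.Int.floordiv_eq_ediv_of_pos (by norm_num)]
      have : (l - 1) / 127 = 0 := by omega
      rw [this]; simp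

theorem lineChunksNeg (l : Int) (h : l < 0) : lineChunks l = iterLineIncrNeg l := by
  induction l using iterLineIncrNeg.induct with
  | case1 l h1 ih =>
      unfold iterLineIncrNeg
      rw [dif_pos h1, ← ih (by omega)]
      unfold lineChunks
      rw [if_neg (by omega : ¬ (0:Int) < l), if_neg (by omega : ¬ (0:Int) < l + 128)]
      rw [PySem.Int.floordiv_eq_ediv_of_pos (by norm_num), PySem.Int.floordiv_eq_ediv_of_pos (by norm_num)]
      have hk : (-l - 1) / 128 = (-(l + 128) - 1) / 128 + 1 := by omega
      have hk' : 0 ≤ (-(l + 128) - 1) / 128 := by omega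
      rw [hk]
      have : ((-(l + 128) - 1) / 128 + 1).toNat = ((-(l + 128) - 1) / 128).toNat + 1 := by omega
      rw [this, List.replicate_succ]
      have he : 256 + l + 128 * ((-(l + 128) - 1) / 128 + 1) = 256 + (l + 128) + 128 * ((-(l + 128) - 1) / 128) := by ring
      rw [he]
      simp
  | case2 l h1 =>
      unfold iterLineIncrNeg
      rw [dif_neg h1]
      unfold lineChunks
      rw [if_neg (by omega : ¬ (0:Int) < l), PySem.Int.floordiv_eq_ediv_of_pos (by norm_num)]
      have : (-l - 1) / 128 = 0 := by omega
      rw [this]; simp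

theorem go_eq (lnotab : List (Int × Int)) (lastoffset lastlineno : Int) :
    encode_lnotab_go lnotab lastoffset lastlineno = encode_lnotab_alt_go lnotab lastoffset lastlineno := by
  induction lnotab generalizing lastoffset lastlineno with
  | nil => rfl
  | cons p rest ih =>
    obtain ⟨offset, lineno⟩ := p
    unfold encode_lnotab_go encode_lnotab_alt_go
    by_cases hz : (lineno - lastlineno == 0) = true
    · simp only [hz, if_true]
      exact ih _ _
    · simp only [eq_false_of_ne_true hz, Bool.false_eq_true, if_false]
      have hl : lineno - lastlineno ≠ 0 := by simpa using hz
      have hw := byteChunks_weave (offset - lastoffset)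
      have hlc : lineChunks (lineno - lastlineno) = iter_line_incr (lineno - lastlineno) := by
        rcases lt_or_gt_of_ne hl with h | h
        · rw [lineChunksNeg _ h]
          unfold iter_line_incr
          rw [if_neg (by omega)]
        · rw [lineChunksPos _ h]
          unfold iter_line_incr
          rw [if_pos h]
      rw [← hw.1, ← hw.2, ← hlc]
      simp only [List.append_assoc, List.cons_append, List.nil_append]
      rw [ih]

-- ===== VERDICT (by name: the statement is the Claim_ definition above) =====
theorem encode_lnotab_spec : Claim_equal_encode_lnotab := by
  intro lnotab firstlineno _
  unfold Spec_encode_lnotab encode_lnotab encode_lnotab_alt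
  exact go_eq lnotab 0 firstlineno
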